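-- pv_equiv track=rewrite | github.com/thealper2/codewars-solutions | 6-kyu/n_centered_array.py | is_centered
-- ===== SOURCE A (Python) =====
-- def is_centered(arr: list[int], N: int) -> bool:
--     if not arr:
--         return N == 0
--
--     total = len(arr)
--     prefix = [0]
--     for v in arr:
--         prefix.append(prefix[-1] + v)
--
--     for trim in range(total // 2 + 1):
--         l, r = trim, total - trim
--         if l > r:
--             break
--
--         sub_sum = prefix[r] - prefix[l]
--         if sub_sum == N:
--             return True
--
--     return False
-- ===== SOURCE B (Python) =====
-- def is_centered(arr: list[int], N: int) -> bool:
--     s = sum(arr)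
--     i, j = 0, len(arr)
--     while i <= j:
--         if s == N:
--             return True
--         if i == j:
--             break
--         s -= arr[i] + arr[j - 1]
--         i += 1
--         j -= 1
--     return False
-- ===== Notes on version B (the rewrite author's own statement) =====
-- stated objective: simpler
-- what changed: Replaced A's prefix-sum table plus indexed lookups by a two-pointer while loop that maintains the middle-window sum incrementally by subtracting the two trimmed endpoints; no auxiliary array is built.
import Mathlib
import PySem

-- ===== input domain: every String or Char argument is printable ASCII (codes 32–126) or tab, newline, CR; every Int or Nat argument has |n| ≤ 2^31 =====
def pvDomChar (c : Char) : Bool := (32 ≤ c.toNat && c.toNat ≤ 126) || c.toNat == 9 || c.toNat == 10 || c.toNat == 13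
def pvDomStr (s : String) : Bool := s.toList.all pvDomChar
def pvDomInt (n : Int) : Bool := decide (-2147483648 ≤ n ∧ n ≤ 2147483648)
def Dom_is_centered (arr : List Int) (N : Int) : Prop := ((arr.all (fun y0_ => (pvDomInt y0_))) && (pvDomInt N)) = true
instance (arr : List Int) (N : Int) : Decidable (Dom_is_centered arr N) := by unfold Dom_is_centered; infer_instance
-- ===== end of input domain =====

-- B replaces A's prefix-sum table by a two-pointer loop that maintains the middle-window sum by
-- subtracting the two trimmed endpoints (objective: simpler — no auxiliary table).

-- ===== PORT A =====
-- loop 'for trim in range(total // 2 + 1)' with its break/returns; prefix indices are always in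
-- range here, so '.getD 0' on pyGet? is exact for Python's prefix[r]/prefix[l].
def iscALoop (pre : List Int) (total N : Int) : List Int → Bool
  | [] => false
  | trim :: rest =>
      let l := trim
      let r := total - trim
      if l > r then false
      else
        let sub_sum := (PySem.List.pyGet? pre r).getD 0 - (PySem.List.pyGet? pre l).getD 0
        if sub_sum = N then true else iscALoop pre total N rest

def is_centered (arr : List Int) (N : Int) : Bool :=
  if arr = [] then decide (N = 0)
  else
    let total : Int := (arr.length : Int)
    -- prefix.append(prefix[-1] + v); prefix is never empty so '.getD 0' on pyGet? (-1) is exact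
    let pre := arr.foldl (fun acc v => acc ++ [(PySem.List.pyGet? acc (-1)).getD 0 + v]) [0]
    iscALoop pre total N (PySem.List.pyRange 0 (PySem.Int.floordiv total 2 + 1) 1)

-- ===== PORT B =====
-- the 'while i <= j' loop of Source B; i, j stay in 0..len so Nat is exact; arr[i], arr[j-1] are
-- always in range (i < j), so '.getD 0' on pyGet? is exact.
def iscBLoop (arr : List Int) (N : Int) (s : Int) (i j : Nat) : Bool :=
  if i ≤ j then
    if s = N then true
    else if i = j then false
    else iscBLoop arr N
          (s - ((PySem.List.pyGet? arr (i : Int)).getD 0 + (PySem.List.pyGet? arr ((j : Int) - 1)).getD 0))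
          (i + 1) (j - 1)
  else false
termination_by j - i
decreasing_by omega

def is_centered_alt (arr : List Int) (N : Int) : Bool :=
  iscBLoop arr N (arr.foldl (· + ·) 0) 0 arr.length

-- ===== PRECONDITION & SPEC =====
def Spec_is_centered (arr : List Int) (N : Int) (out : Bool) : Prop := out = is_centered_alt arr N
instance (arr : List Int) (N : Int) (out : Bool) : Decidable (Spec_is_centered arr N out) := by unfold Spec_is_centered; infer_instance

-- ===== CLAIM (what is proved, stated in full; the proofs are below) =====
def Claim_equal_is_centered : Prop := ∀ (arr : List Int) (N : Int), Dom_is_centered arr N → Spec_is_centered arr N (is_centered arr N)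

-- ===== LEMMAS AND PROOFS =====

-- A's prefix table is the list of prefix sums.
theorem isc_pref_eq (arr : List Int) :
    arr.foldl (fun acc v => acc ++ [(PySem.List.pyGet? acc (-1)).getD 0 + v]) [0]
      = (List.range (arr.length + 1)).map (fun k => ((arr.take k).sum : Int)) := by
  induction arr using List.reverseRecOn with
  | nil => simp
  | append_singleton l x ih =>
      rw [List.foldl_append, ih]
      simp only [List.foldl_cons, List.foldl_nil]
      have hlast : (PySem.List.pyGet? ((List.range (l.length + 1)).map
          (fun k => ((l.take k).sum : Int))) (-1)).getD 0 = l.sum := by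
        rw [PySem.List.pyGet?_neg_one, List.range_succ, List.map_append]
        simp
      rw [hlast]
      have hlen : (l ++ [x]).length + 1 = (l.length + 1) + 1 := by simp
      rw [hlen, List.range_succ (n := l.length + 1), List.map_append]
      congr 1
      · apply List.map_congr_left
        intro k hk
        rw [List.mem_range] at hk
        rw [List.take_append_of_le_length (by omega)]
      · have htk : (l ++ [x]).take (l.length + 1) = l ++ [x] :=
          List.take_of_length_le (by simp)
        simp [htk]

theorem isc_pref_get (arr : List Int) (k : Nat) (hk : k ≤ arr.length) :
    (PySem.List.pyGet? ((List.range (arr.length + 1)).map (fun k => ((arr.take k).sum : Int))) (k : Int)).getD 0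
      = (arr.take k).sum := by
  rw [PySem.List.pyGet?_natCast]
  rw [List.getElem?_map]
  rw [List.getElem?_range (by omega)]
  rfl

theorem isc_arr_get (arr : List Int) (k : Nat) (hk : k < arr.length) :
    (PySem.List.pyGet? arr (k : Int)).getD 0 = arr[k] := by
  rw [PySem.List.pyGet?_natCast, List.getElem?_eq_getElem hk]
  rfl

theorem isc_take_succ_sum (arr : List Int) (k : Nat) (hk : k < arr.length) :
    (arr.take (k + 1)).sum = (arr.take k).sum + arr[k] :=
  List.sum_take_succ arr k hk

-- main correspondence between the two loops, by downward induction on the remaining trims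
theorem isc_loops (arr : List Int) (N : Int) (k : Nat) :
    ∀ t : Nat, t + k = arr.length / 2 →
      iscALoop ((List.range (arr.length + 1)).map (fun k => ((arr.take k).sum : Int)))
          (arr.length : Int) N (PySem.List.pyRange (t : Int) ((arr.length / 2 : Nat) + 1 : Int) 1)
        = iscBLoop arr N ((arr.take (arr.length - t)).sum - (arr.take t).sum) t (arr.length - t) := by
  induction k with
  | zero =>
      intro t ht
      have hlt : (t : Int) < ((arr.length / 2 : Nat) + 1 : Int) := by exact_mod_cast by omega
      rw [PySem.List.pyRange_one_cons hlt, PySem.List.pyRange_one_eq_nil (by exact_mod_cast by omega)]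
      rw [iscALoop]
      simp only
      have hle : ¬ ((t : Int) > (arr.length : Int) - (t : Int)) := by
        push_cast; omega
      rw [if_neg hle]
      have hnt : ((arr.length : Int) - (t : Int)) = ((arr.length - t : Nat) : Int) := by push_cast; omega
      rw [hnt, isc_pref_get arr (arr.length - t) (by omega), isc_pref_get arr t (by omega)]
      rw [iscBLoop]
      rw [if_pos (by omega : t ≤ arr.length - t)]
      by_cases hN : (arr.take (arr.length - t)).sum - (arr.take t).sum = N
      · simp only [if_pos hN]
      · rw [if_neg hN, if_neg hN, iscALoop]
        by_cases heq : t = arr.length - t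
        · rw [if_pos heq]
        · rw [if_neg heq, iscBLoop, if_neg (by omega)]
  | succ k ih =>
      intro t ht
      have hlt : (t : Int) < ((arr.length / 2 : Nat) + 1 : Int) := by exact_mod_cast by omega
      rw [PySem.List.pyRange_one_cons hlt]
      rw [iscALoop]
      simp only
      have hle : ¬ ((t : Int) > (arr.length : Int) - (t : Int)) := by push_cast; omega
      rw [if_neg hle]
      have hnt : ((arr.length : Int) - (t : Int)) = ((arr.length - t : Nat) : Int) := by push_cast; omega
      rw [hnt, isc_pref_get arr (arr.length - t) (by omega), isc_pref_get arr t (by omega)]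
      rw [iscBLoop]
      rw [if_pos (by omega : t ≤ arr.length - t)]
      by_cases hN : (arr.take (arr.length - t)).sum - (arr.take t).sum = N
      · simp only [if_pos hN]
      · rw [if_neg hN, if_neg hN, if_neg (by omega : ¬ t = arr.length - t)]
        have h1 : ((t : Int) + 1) = ((t + 1 : Nat) : Int) := by push_cast; ring
        rw [h1, ih (t + 1) (by omega)]
        congr 1
        · have hj : ((arr.length - t : Nat) : Int) - 1 = ((arr.length - t - 1 : Nat) : Int) := by
            push_cast; omega
          rw [hj, isc_arr_get arr t (by omega), isc_arr_get arr (arr.length - t - 1) (by omega)]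
          have e1 : (arr.take (arr.length - t)).sum
              = (arr.take (arr.length - t - 1)).sum + arr[arr.length - t - 1] := by
            have := isc_take_succ_sum arr (arr.length - t - 1) (by omega)
            rw [(by omega : arr.length - t - 1 + 1 = arr.length - t)] at this
            exact this
          have e2 : (arr.take (t + 1)).sum = (arr.take t).sum + arr[t] :=
            isc_take_succ_sum arr t (by omega)
          have harm : arr.length - t - 1 = arr.length - (t + 1) := by omega
          rw [← harm]
          rw [e1, e2]; ring

theorem isc_foldl_add (arr : List Int) : ∀ a : Int, arr.foldl (· + ·) a = a + arr.sum := by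
  induction arr with
  | nil => simp
  | cons x xs ih => intro a; simp [List.foldl_cons, ih, add_assoc]

theorem isc_sum_foldl (arr : List Int) : arr.foldl (· + ·) 0 = arr.sum := by
  rw [isc_foldl_add]; ring

theorem is_centered_spec : Claim_equal_is_centered := by
  intro arr N _
  unfold Spec_is_centered
  by_cases h : arr = []
  · subst h
    unfold is_centered is_centered_alt
    rw [iscBLoop]
    by_cases hN : N = 0 <;> simp [hN] <;> omega
  · unfold is_centered is_centered_alt
    rw [if_neg h]
    simp only
    rw [isc_pref_eq]
    have hfd : PySem.Int.floordiv (arr.length : Int) 2 = ((arr.length / 2 : Nat) : Int) := by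
      exact_mod_cast PySem.Int.floordiv_natCast arr.length 2
    rw [hfd]
    have := isc_loops arr N (arr.length / 2) 0 (by omega)
    simp only [Nat.cast_zero, Nat.sub_zero, List.take_zero, List.sum_nil, Int.sub_zero,
      List.take_length] at this
    rw [isc_sum_foldl]
    exact this
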